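-- pv_equiv track=rewrite | github.com/donatodesia/PngManipulator | core/packer.py | _layout_grid
-- ===== SOURCE A (Python) =====
-- def _layout_grid(sprites, columns, cell_w, cell_h, padding):
--     count = len(sprites)
--     cols  = min(columns, count)
--     rows  = (count + cols - 1) // cols
--     sheet_w = cols * cell_w + (cols + 1) * padding
--     sheet_h = rows * cell_h + (rows + 1) * padding
--     positions = [
--         (padding + (i % cols) * (cell_w + padding),
--          padding + (i // cols) * (cell_h + padding))
--         for i in range(count)
--     ]
--     return positions, sheet_w, sheet_h
-- ===== SOURCE B (Python) =====
-- def _layout_grid(sprites, columns, cell_w, cell_h, padding):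
--     count = len(sprites)
--     cols = min(columns, count)
--     rows = (count + cols - 1) // cols
--     sheet_w = cols * cell_w + (cols + 1) * padding
--     sheet_h = rows * cell_h + (rows + 1) * padding
--     step_x = cell_w + padding
--     step_y = cell_h + padding
--     positions = []
--     y = padding
--     for _ in range(rows):
--         x = padding
--         for _ in range(cols):
--             if len(positions) == count:
--                 break
--             positions.append((x, y))
--             x += step_x
--         y += step_y
--     return positions, sheet_w, sheet_h
-- ===== Notes on version B (the rewrite author's own statement) =====
-- stated objective: alternative
-- what changed: B replaces the index comprehension computing (i % cols, i // cols) per sprite by a nested row/column loop that maintains running x/y coordinate accumulators (no division or modulo per element) and stops after count cells.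
-- outside the precondition, e.g. on _layout_grid([0, 1], -1, -1, -1, -1): A returns ([(-1, -1), (-1, 1)], 1, -1), B returns ([], 1, -1)
import Mathlib
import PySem

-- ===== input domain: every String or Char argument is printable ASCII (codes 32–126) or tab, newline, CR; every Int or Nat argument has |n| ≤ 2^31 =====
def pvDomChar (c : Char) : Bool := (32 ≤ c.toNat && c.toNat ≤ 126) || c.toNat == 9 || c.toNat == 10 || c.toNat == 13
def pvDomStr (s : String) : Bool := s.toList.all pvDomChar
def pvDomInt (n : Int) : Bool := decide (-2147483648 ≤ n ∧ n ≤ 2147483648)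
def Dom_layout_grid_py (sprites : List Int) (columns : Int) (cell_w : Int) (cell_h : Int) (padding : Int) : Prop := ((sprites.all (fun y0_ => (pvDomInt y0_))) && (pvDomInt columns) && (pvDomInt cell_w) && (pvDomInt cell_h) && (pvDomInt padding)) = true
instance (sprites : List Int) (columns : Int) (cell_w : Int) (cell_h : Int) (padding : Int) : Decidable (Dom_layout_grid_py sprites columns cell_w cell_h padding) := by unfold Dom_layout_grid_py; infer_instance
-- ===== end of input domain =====

-- B replaces A's per-index divmod comprehension by a nested row/column loop with running
-- x/y coordinate accumulators; same return value on Pre_ (alternative decomposition, not faster).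

-- ===== PORT A =====
def layout_grid_py (sprites : List Int) (columns : Int) (cell_w : Int) (cell_h : Int) (padding : Int) : (List (Int × Int)) × Int × Int :=
  let count : Int := sprites.length
  let cols : Int := min columns count
  let rows : Int := PySem.Int.floordiv (count + cols - 1) cols
  let sheet_w : Int := cols * cell_w + (cols + 1) * padding
  let sheet_h : Int := rows * cell_h + (rows + 1) * padding
  let positions : List (Int × Int) :=
    (PySem.List.pyRange 0 count 1).map (fun i =>
      (padding + (PySem.Int.mod i cols) * (cell_w + padding),
       padding + (PySem.Int.floordiv i cols) * (cell_h + padding)))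
  (positions, sheet_w, sheet_h)

-- ===== PORT B =====
-- inner-loop body of Source B; Python's `break` only skips the rest of the inner loop, which is
-- modelled exactly by the remaining iterations being the identity once the count is reached
def pvInnerStep (count sx y : Int) (ist : List (Int × Int) × Int) : List (Int × Int) × Int :=
  if (ist.1.length : Int) = count then ist
  else (ist.1 ++ [(ist.2, y)], ist.2 + sx)

-- outer-loop body of Source B (one row: run the inner column loop, then advance y)
def pvOuterStep (count cols sx sy padding : Int) (st : List (Int × Int) × Int) : List (Int × Int) × Int :=
  let inner := (PySem.List.pyRange 0 cols 1).foldl (fun ist _ => pvInnerStep count sx st.2 ist) (st.1, padding)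
  (inner.1, st.2 + sy)

def layout_grid_py_alt (sprites : List Int) (columns : Int) (cell_w : Int) (cell_h : Int) (padding : Int) : (List (Int × Int)) × Int × Int :=
  let count : Int := sprites.length
  let cols : Int := min columns count
  let rows : Int := PySem.Int.floordiv (count + cols - 1) cols
  let sheet_w : Int := cols * cell_w + (cols + 1) * padding
  let sheet_h : Int := rows * cell_h + (rows + 1) * padding
  let step_x : Int := cell_w + padding
  let step_y : Int := cell_h + padding
  let st := (PySem.List.pyRange 0 rows 1).foldl
      (fun st _ => pvOuterStep count cols step_x step_y padding st)
      (([] : List (Int × Int)), padding)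
  (st.1, sheet_w, sheet_h)

-- ===== PRECONDITION & SPEC =====
-- Pre_ excludes empty sprite lists and columns = 0, on which A raises ZeroDivisionError, and
-- negative columns, an unspecified corner where A's negative-modulo cell offsets and B's empty
-- grid are both merely defensible accidents of floor division on a grid nobody asked for.
def Pre_layout_grid_py (sprites : List Int) (columns : Int) (cell_w : Int) (cell_h : Int) (padding : Int) : Prop :=
  sprites ≠ [] ∧ 1 ≤ columns
instance (sprites : List Int) (columns : Int) (cell_w : Int) (cell_h : Int) (padding : Int) : Decidable (Pre_layout_grid_py sprites columns cell_w cell_h padding) := by unfold Pre_layout_grid_py; infer_instance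

def pvWitness_layout_grid_py : List Int × Int × Int × Int × Int := ([7, 8, 9], 2, 10, 12, 1)

def Spec_layout_grid_py (sprites : List Int) (columns : Int) (cell_w : Int) (cell_h : Int) (padding : Int) (out : (List (Int × Int)) × Int × Int) : Prop := out = layout_grid_py_alt sprites columns cell_w cell_h padding
instance (sprites : List Int) (columns : Int) (cell_w : Int) (cell_h : Int) (padding : Int) (out : (List (Int × Int)) × Int × Int) : Decidable (Spec_layout_grid_py sprites columns cell_w cell_h padding out) := by unfold Spec_layout_grid_py; infer_instance

-- ===== CLAIM (what is proved, stated in full; the proofs are below) =====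
def Claim_equal_layout_grid_py : Prop := ∀ (sprites : List Int) (columns : Int) (cell_w : Int) (cell_h : Int) (padding : Int), Dom_layout_grid_py sprites columns cell_w cell_h padding → Pre_layout_grid_py sprites columns cell_w cell_h padding → Spec_layout_grid_py sprites columns cell_w cell_h padding (layout_grid_py sprites columns cell_w cell_h padding)

-- ===== LEMMAS AND PROOFS =====

-- a foldl whose body ignores the list elements is an iterate
theorem pv_foldl_iterate {α : Type} (step : α → α) (l : List Int) (init : α) :
    l.foldl (fun s _ => step s) init = step^[l.length] init := by
  induction l generalizing init with
  | nil => rfl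
  | cons a t ih => simp [List.foldl_cons, ih, Function.iterate_succ_apply]

-- characterisation of the inner (column) loop of B
theorem pv_inner_iter (count sx y : Int) (N : Nat) (hc : count = (N : Int)) :
    ∀ (m : Nat) (ps : List (Int × Int)) (x : Int), ps.length ≤ N →
    (pvInnerStep count sx y)^[m] (ps, x) =
      (ps ++ (List.range (min m (N - ps.length))).map (fun k : Nat => (x + (k : Int) * sx, y)),
       x + ((min m (N - ps.length) : Nat) : Int) * sx) := by
  intro m
  induction m with
  | zero => intro ps x h; simp
  | succ m ih =>
    intro ps x h
    rw [Function.iterate_succ_apply]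
    by_cases hfull : ps.length = N
    · have hstep : pvInnerStep count sx y (ps, x) = (ps, x) := by
        simp [pvInnerStep, hc, hfull]
      rw [hstep, ih ps x h]
      simp [hfull]
    · have hlt : ps.length < N := lt_of_le_of_ne h hfull
      have hstep : pvInnerStep count sx y (ps, x) = (ps ++ [(x, y)], x + sx) := by
        simp [pvInnerStep, hc]
        omega
      rw [hstep, ih (ps ++ [(x, y)]) (x + sx) (by simp; omega)]
      have hL : N - ps.length = (N - (ps ++ [(x, y)]).length) + 1 := by simp; omega
      rw [hL]
      have hmin : min (m + 1) ((N - (ps ++ [(x, y)]).length) + 1)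
          = min m (N - (ps ++ [(x, y)]).length) + 1 := by omega
      rw [hmin]
      simp only [Prod.mk.injEq]
      refine ⟨?_, ?_⟩
      · rw [List.range_succ_eq_map, List.map_cons, List.map_map, List.append_assoc]
        norm_num
        intro a _ _
        ring
      · push_cast
        ring

-- characterisation of the outer (row) loop of B
theorem pv_outer_iter (count colsZ sx sy padding : Int) (N c : Nat)
    (hc : count = (N : Int)) (hcol : colsZ = (c : Int)) (hcpos : 0 < c) :
    ∀ r : Nat,
    (pvOuterStep count colsZ sx sy padding)^[r] (([] : List (Int × Int)), padding) =
      ((List.range (min (r * c) N)).map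
        (fun i : Nat => (padding + ((i % c : Nat) : Int) * sx, padding + ((i / c : Nat) : Int) * sy)),
       padding + (r : Int) * sy) := by
  intro r
  induction r with
  | zero => simp
  | succ r ih =>
    rw [Function.iterate_succ_apply', ih]
    set L := min (r * c) N with hLdef
    have hLle : L ≤ N := by omega
    have hlen : ((List.range L).map
        (fun i : Nat => (padding + ((i % c : Nat) : Int) * sx, padding + ((i / c : Nat) : Int) * sy))).length = L := by
      simp
    unfold pvOuterStep
    have hcount : (PySem.List.pyRange 0 colsZ 1).length = c := by
      rw [PySem.List.length_pyRange_one, hcol]; simp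
    rw [show (fun ist (_ : Int) => pvInnerStep count sx (padding + (r : Int) * sy) ist)
        = (fun s _ => pvInnerStep count sx (padding + (r : Int) * sy) s) from rfl]
    rw [pv_foldl_iterate, hcount,
        pv_inner_iter count sx (padding + (r : Int) * sy) N hc c _ padding (by rw [hlen]; exact hLle)]
    rw [hlen]
    simp only [Prod.mk.injEq]
    refine ⟨?_, by push_cast; ring⟩
    have hsum : min ((r + 1) * c) N = L + min c (N - L) := by
      have : (r + 1) * c = r * c + c := by ring
      omega
    rw [hsum, List.range_add, List.map_append, List.map_map]
    congr 1
    apply List.map_congr_left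
    intro k hk
    simp only [List.mem_range] at hk
    by_cases hfull : L = N
    · omega
    · have hL : L = r * c := by omega
      have hkc : k < c := by omega
      simp only [Function.comp]
      rw [hL, show r * c + k = k + r * c by ring, Nat.add_mul_mod_self_right,
          Nat.mod_eq_of_lt hkc, Nat.add_mul_div_right _ _ hcpos, Nat.div_eq_of_lt hkc]
      push_cast
      ring_nf

-- ===== VERDICT (by name: the statement is the Claim_ definition above) =====
theorem layout_grid_py_spec : Claim_equal_layout_grid_py := by
  intro sprites columns cell_w cell_h padding _ hpre
  obtain ⟨hne, hcolge⟩ := hpre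
  unfold Spec_layout_grid_py
  have hn1 : 1 ≤ sprites.length := List.length_pos_of_ne_nil hne
  set n : Nat := sprites.length with hn
  set cZ : Int := min columns (n : Int) with hcZ
  have hcZpos : 1 ≤ cZ := le_min hcolge (by exact_mod_cast hn1)
  set c : Nat := cZ.toNat with hcdef
  have hcol : cZ = (c : Int) := (Int.toNat_of_nonneg (by omega)).symm
  have hcpos : 0 < c := by omega
  set rZ : Int := PySem.Int.floordiv ((n : Int) + cZ - 1) cZ with hrZ
  have hbr := (PySem.Int.floordiv_eq_iff_of_pos (a := (n : Int) + cZ - 1) (b := cZ)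
      (q := rZ) (by omega)).mp rfl
  have hexp : (rZ + 1) * cZ = rZ * cZ + cZ := by ring
  have hle : (n : Int) ≤ rZ * cZ := by
    have := hbr.2
    rw [hexp] at this
    omega
  have hrZnn : 0 ≤ rZ := by nlinarith
  set R : Nat := rZ.toNat with hRdef
  have hrow : rZ = (R : Int) := (Int.toNat_of_nonneg hrZnn).symm
  have hnR : n ≤ R * c := by
    have : (n : Int) ≤ ((R * c : Nat) : Int) := by push_cast; rw [← hrow, ← hcol]; exact hle
    exact_mod_cast this
  unfold layout_grid_py layout_grid_py_alt
  simp only [← hn, ← hcZ, ← hrZ, Prod.mk.injEq]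
  refine ⟨?_, trivial⟩
  rw [pv_foldl_iterate (pvOuterStep (n : Int) cZ (cell_w + padding) (cell_h + padding) padding)]
  have hlenR : (PySem.List.pyRange 0 rZ 1).length = R := by
    rw [PySem.List.length_pyRange_one, hrow]; simp
  rw [hlenR, pv_outer_iter (n : Int) cZ (cell_w + padding) (cell_h + padding) padding n c rfl hcol hcpos R]
  rw [PySem.List.pyRange_one]
  simp only [sub_zero, Int.toNat_natCast, Nat.min_eq_right hnR, List.map_map]
  apply List.map_congr_left
  intro k _
  simp only [Function.comp, zero_add, hcol, PySem.Int.mod_natCast, PySem.Int.floordiv_natCast]
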